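-- pv_equiv track=rewrite | github.com/milan-shine/craftgpt | emulator.py | to_float16
-- ===== SOURCE A (Python) =====
-- FIXED_POINT_SIZE = 24
--
-- FIXED_POINT_MASK = (1 << FIXED_POINT_SIZE) - 1
--
-- def to_float16(value, offset=0):
--     neg = False
--     if value > FIXED_POINT_MASK // 2:
--         neg = True
--         value = (-value) & (FIXED_POINT_MASK // 2)
--     for i in range(FIXED_POINT_SIZE - 1, -1, -1):
--         if ((value >> i) & 1) > 0:
--             res = ((value << (FIXED_POINT_SIZE - i)) >> (14)) & ((1 << 10) - 1)
--             res += (i + 9 - offset) << 10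
--             res += int(neg) << 15
--             return res
--     return 0
-- ===== SOURCE B (Python) =====
-- FIXED_POINT_SIZE = 24
--
-- FIXED_POINT_MASK = (1 << FIXED_POINT_SIZE) - 1
--
-- def to_float16(value, offset=0):
--     neg = value > FIXED_POINT_MASK // 2
--     if neg:
--         value = (-value) & (FIXED_POINT_MASK // 2)
--     m = value % (1 << FIXED_POINT_SIZE)
--     exp = FIXED_POINT_SIZE + 8 - offset
--     while 0 < m < 1 << (FIXED_POINT_SIZE - 1):
--         m <<= 1
--         exp -= 1
--     if m == 0:
--         return 0
--     return ((m >> 13) & 0x3FF) + (exp << 10) + (int(neg) << 15)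
-- ===== Notes on version B (the rewrite author's own statement) =====
-- stated objective: alternative
-- what changed: A probes each bit of the fixed value from 23 down to 0 until it finds the MSB and then extracts the mantissa by shifting the original value; B instead normalizes an accumulator by repeated doubling (classic float normalization: shift mantissa left while decrementing an exponent accumulator until it reaches [2^23, 2^24)) and reads the mantissa directly off the normalized accumulator.
import Mathlib
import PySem

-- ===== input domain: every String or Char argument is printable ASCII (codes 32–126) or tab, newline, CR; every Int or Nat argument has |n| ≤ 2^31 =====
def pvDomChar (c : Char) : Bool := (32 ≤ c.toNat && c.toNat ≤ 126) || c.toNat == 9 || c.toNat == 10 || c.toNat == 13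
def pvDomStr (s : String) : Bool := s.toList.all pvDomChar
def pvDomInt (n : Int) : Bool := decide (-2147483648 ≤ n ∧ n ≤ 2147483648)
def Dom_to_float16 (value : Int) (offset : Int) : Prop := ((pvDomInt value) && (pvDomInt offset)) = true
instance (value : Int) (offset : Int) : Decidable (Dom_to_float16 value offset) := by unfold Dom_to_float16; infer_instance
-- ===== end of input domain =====

-- B replaces A's descending per-bit probe of the fixed value by a normalization loop that doubles a mantissa accumulator while decrementing an exponent accumulator (alternative decomposition, same cost).

-- ===== PORT A =====
-- the for-loop with early return: the first i (from 23 down to 0) whose bit of value is set yields the result, else 0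
def to_float16_go (value : Int) (offset : Int) (neg : Bool) : List Int → Int
  | [] => 0
  | i :: rest =>
    if PySem.Int.band (value >>> i.toNat) 1 > 0 then
      PySem.Int.band ((value <<< (24 - i).toNat) >>> (14 : Nat)) (((1 : Int) <<< (10 : Nat)) - 1)
        + ((i + 9 - offset) <<< (10 : Nat))
        + ((if neg then (1 : Int) else 0) <<< (15 : Nat))
    else to_float16_go value offset neg rest

def to_float16 (value : Int) (offset : Int) : Int :=
  let mask : Int := ((1 : Int) <<< (24 : Nat)) - 1
  let neg := decide (value > PySem.Int.floordiv mask 2)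
  let value := if value > PySem.Int.floordiv mask 2 then PySem.Int.band (-value) (PySem.Int.floordiv mask 2) else value
  to_float16_go value offset neg (PySem.List.pyRange (24 - 1) (-1) (-1))


-- ===== PORT B =====
-- the while loop 'while 0 < m < 2^23: m <<= 1; exp -= 1' over the pair (m, exp)
def pv_norm (m : Int) (exp : Int) : Int × Int :=
  if h : 0 < m ∧ m < (1 : Int) <<< (23 : Nat) then pv_norm (m <<< (1 : Nat)) (exp - 1) else (m, exp)
termination_by (((1 : Int) <<< (23 : Nat)) - m).toNat
decreasing_by
  simp only [Int.shiftLeft_eq] at *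
  norm_num at *
  omega

def to_float16_alt (value : Int) (offset : Int) : Int :=
  let mask : Int := ((1 : Int) <<< (24 : Nat)) - 1
  let neg := decide (value > PySem.Int.floordiv mask 2)
  let value := if neg then PySem.Int.band (-value) (PySem.Int.floordiv mask 2) else value
  let m0 : Int := PySem.Int.mod value ((1 : Int) <<< (24 : Nat))
  let me := pv_norm m0 (24 + 8 - offset)
  if me.1 = 0 then 0
  else
    PySem.Int.band (me.1 >>> (13 : Nat)) 0x3FF
      + (me.2 <<< (10 : Nat))
      + ((if neg then (1 : Int) else 0) <<< (15 : Nat))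


-- ===== PRECONDITION & SPEC =====
def Spec_to_float16 (value : Int) (offset : Int) (out : Int) : Prop := out = to_float16_alt value offset
instance (value : Int) (offset : Int) (out : Int) : Decidable (Spec_to_float16 value offset out) := by unfold Spec_to_float16; infer_instance

-- ===== CLAIM (what is proved, stated in full; the proofs are below) =====
def Claim_equal_to_float16 : Prop := ∀ (value : Int) (offset : Int), Dom_to_float16 value offset → Spec_to_float16 value offset (to_float16 value offset)

-- ===== LEMMAS AND PROOFS =====

theorem pv_band_mask (a : Int) (k : Nat) :
    PySem.Int.band a ((2 : Int) ^ k - 1) = a % (2 : Int) ^ k := by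
  have hp : (1 : Nat) ≤ 2 ^ k := Nat.one_le_two_pow
  have hpi : ((2 : Int) ^ k) = ((2 ^ k : Nat) : Int) := by push_cast; ring
  have htn : ((2 : Int) ^ k - 1).toNat = 2 ^ k - 1 := by omega
  unfold PySem.Int.band
  rcases le_or_gt 0 a with ha | ha
  · rw [if_pos ha, if_pos (by omega : (0:Int) ≤ 2 ^ k - 1), htn,
      Nat.and_two_pow_sub_one_eq_mod]
    have := Int.toNat_of_nonneg ha
    push_cast
    rw [this]
  · rw [if_neg (by omega), if_pos (by omega : (0:Int) ≤ 2 ^ k - 1), htn]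
    set n : Nat := (-a - 1).toNat with hn
    have hna : (n : Int) = -a - 1 := Int.toNat_of_nonneg (by omega)
    rw [Nat.land_comm, Nat.and_two_pow_sub_one_eq_mod]
    have hmlt : n % 2 ^ k < 2 ^ k := Nat.mod_lt _ (by omega)
    have hdvd : ((2 : Int) ^ k) ∣ (n : Int) - ((n % 2 ^ k : Nat) : Int) := by
      refine ⟨(n / 2 ^ k : Nat), ?_⟩
      have := Nat.div_add_mod n (2 ^ k)
      push_cast
      push_cast at this ⊢
      nlinarith [this]
    have hcong : a % (2:Int) ^ k = ((2:Int) ^ k - 1 - ((n % 2 ^ k : Nat) : Int)) % 2 ^ k := by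
      rw [Int.emod_eq_emod_iff_emod_sub_eq_zero]
      have : a - ((2:Int) ^ k - 1 - ((n % 2 ^ k : Nat) : Int)) =
          -(((n : Int) - ((n % 2 ^ k : Nat) : Int))) - 2 ^ k := by
        rw [hna]; ring
      rw [this]
      rcases hdvd with ⟨c, hc⟩
      have : -(((n : Int) - ((n % 2 ^ k : Nat) : Int))) - 2 ^ k = 2 ^ k * (-c - 1) := by
        rw [hc]; ring
      rw [this, Int.mul_emod_right]
    rw [hcong, Int.emod_eq_of_lt (by rw [hpi]; omega) (by rw [hpi]; omega)]
    rw [hpi]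
    omega

theorem pv_bit_eq (v : Int) (j : Nat) (hj : j < 24) :
    (v % 2 ^ 24) / 2 ^ j % 2 = v / 2 ^ j % 2 := by
  have hv : v = v % 2 ^ 24 + (2:Int) ^ j * (2 ^ (24 - j) * (v / 2 ^ 24)) := by
    have h24 : (2:Int) ^ j * 2 ^ (24 - j) = 2 ^ 24 := by
      rw [← pow_add]; congr 1; omega
    have h := Int.mul_ediv_add_emod v ((2:Int) ^ 24)
    calc v = 2 ^ 24 * (v / 2 ^ 24) + v % 2 ^ 24 := h.symm
      _ = v % 2 ^ 24 + 2 ^ j * (2 ^ (24 - j) * (v / 2 ^ 24)) := by rw [← h24]; ring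
  conv_rhs => rw [hv]
  rw [Int.add_mul_ediv_left _ _ (by positivity : ((2:Int) ^ j) ≠ 0)]
  have h1 : (2:Int) ^ (24 - j) * (v / 2 ^ 24) = 2 * (2 ^ (24 - j - 1) * (v / 2 ^ 24)) := by
    rw [← mul_assoc, ← pow_succ']
    congr 2
    omega
  rw [h1, Int.add_mul_emod_self_left]

theorem pv_mant_eq (v : Int) (j : Nat) (hj : j < 24) :
    ((v % 2 ^ 24) * 2 ^ (24 - j) / 2 ^ 14) % 2 ^ 10 = (v * 2 ^ (24 - j) / 2 ^ 14) % 2 ^ 10 := by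
  have hv : v * 2 ^ (24 - j) =
      (v % 2 ^ 24) * 2 ^ (24 - j) + (2:Int) ^ 14 * (2 ^ (34 - j) * (v / 2 ^ 24)) := by
    have h24 : (2:Int) ^ 14 * 2 ^ (34 - j) = 2 ^ 24 * 2 ^ (24 - j) := by
      rw [← pow_add, ← pow_add]; congr 1; omega
    have h := Int.mul_ediv_add_emod v ((2:Int) ^ 24)
    calc v * 2 ^ (24 - j) = (2 ^ 24 * (v / 2 ^ 24) + v % 2 ^ 24) * 2 ^ (24 - j) := by rw [h]
      _ = v % 2 ^ 24 * 2 ^ (24 - j) + (2 ^ 24 * 2 ^ (24 - j)) * (v / 2 ^ 24) := by ring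
      _ = v % 2 ^ 24 * 2 ^ (24 - j) + (2:Int) ^ 14 * (2 ^ (34 - j) * (v / 2 ^ 24)) := by rw [← h24]; ring
  conv_rhs => rw [hv]
  rw [Int.add_mul_ediv_left _ _ (by positivity : ((2:Int) ^ 14) ≠ 0)]
  have h1 : (2:Int) ^ (34 - j) * (v / 2 ^ 24) = 2 ^ 10 * (2 ^ (24 - j) * (v / 2 ^ 24)) := by
    rw [← mul_assoc, ← pow_add]
    congr 2
    omega
  rw [h1, Int.add_mul_emod_self_left]

-- the normalization loop, characterized at a value whose top set bit is bit j
theorem pv_norm_spec (k : Nat) (j : Nat) (m e : Int) (hj : j ≤ 23) (hk : k = 23 - j)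
    (h1 : (2 : Int) ^ j ≤ m) (h2 : m < 2 ^ (j + 1)) :
    pv_norm m e = (m * 2 ^ k, e - k) := by
  induction k generalizing j m e with
  | zero =>
    have hj23 : j = 23 := by omega
    rw [pv_norm]
    rw [dif_neg]
    · simp
    · subst hj23
      intro ⟨_, hlt⟩
      simp only [Int.shiftLeft_eq, one_mul] at hlt
      omega
  | succ k ih =>
    have hjlt : j < 23 := by omega
    have hm0 : (0:Int) < m := lt_of_lt_of_le (by positivity) h1
    have hmlt : m < (1:Int) <<< (23:Nat) := by
      simp only [Int.shiftLeft_eq, one_mul]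
      calc m < 2 ^ (j + 1) := h2
        _ ≤ 2 ^ 23 := by
          apply pow_le_pow_right₀ (by norm_num)
          omega
    rw [pv_norm, dif_pos ⟨hm0, hmlt⟩]
    have hsh : m <<< (1:Nat) = m * 2 := by simp [Int.shiftLeft_eq]
    rw [hsh]
    have := ih (j + 1) (m * 2) (e - 1) (by omega) (by omega)
      (by rw [pow_succ]; nlinarith) (by rw [pow_succ]; nlinarith)
    rw [this, Prod.mk.injEq]
    refine ⟨by rw [pow_succ]; ring, by push_cast; ring⟩

theorem pv_loop (j : Nat) (hj : j ≤ 24) (v offset : Int) (neg : Bool)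
    (hm : v % 2 ^ 24 < 2 ^ j) :
    to_float16_go v offset neg (PySem.List.pyRange ((j : Int) - 1) (-1) (-1)) =
      (let me := pv_norm (v % 2 ^ 24) (24 + 8 - offset);
       if me.1 = 0 then 0
       else
         PySem.Int.band (me.1 >>> (13 : Nat)) 0x3FF
           + (me.2 <<< (10 : Nat))
           + ((if neg then (1 : Int) else 0) <<< (15 : Nat)) : Int) := by
  induction j with
  | zero =>
    rw [show ((0 : Nat) : Int) - 1 = -1 by norm_num,
      PySem.List.pyRange_neg_one_eq_nil (le_refl _)]
    have h0 : 0 ≤ v % 2 ^ 24 := Int.emod_nonneg v (by norm_num)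
    have hz : v % 2 ^ 24 = 0 := by norm_num at hm; omega
    rw [to_float16_go]
    simp only [hz]
    rw [pv_norm, dif_neg (by simp)]
    norm_num
  | succ j ih =>
    have hj' : j < 24 := by omega
    have hmnn : 0 ≤ v % 2 ^ 24 := Int.emod_nonneg v (by norm_num)
    rw [show ((j + 1 : Nat) : Int) - 1 = (j : Int) by push_cast; ring,
      PySem.List.pyRange_neg_one_cons (by omega)]
    rw [to_float16_go]
    have htn : ((j : Int)).toNat = j := Int.toNat_natCast j
    have hcond : PySem.Int.band (v >>> (j : Int).toNat) 1 = v / 2 ^ j % 2 := by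
      rw [PySem.Int.band_one, PySem.Int.mod_eq_emod_of_pos (by norm_num), htn,
        Int.shiftRight_eq_div_pow]
      push_cast
      ring_nf
    by_cases hbit : v / 2 ^ j % 2 = 1
    · rw [if_pos (by rw [hcond, hbit]; norm_num)]
      have hbitm : (v % 2 ^ 24) / 2 ^ j % 2 = 1 := by rw [pv_bit_eq v j hj', hbit]
      have hge : (2 : Int) ^ j ≤ v % 2 ^ 24 := by
        by_contra hlt
        rw [Int.ediv_eq_zero_of_lt hmnn (by omega)] at hbitm
        norm_num at hbitm
      have hne : v % 2 ^ 24 ≠ 0 := by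
        have : (0:Int) < 2 ^ j := by positivity
        omega
      have hnorm := pv_norm_spec (23 - j) j (v % 2 ^ 24) (24 + 8 - offset) (by omega) rfl hge hm
      simp only [hnorm]
      have hMne : v % 2 ^ 24 * 2 ^ (23 - j) ≠ 0 := by
        have : (0:Int) < 2 ^ (23 - j) := by positivity
        have : (0:Int) < v % 2 ^ 24 * 2 ^ (23 - j) := by positivity
        omega
      rw [if_neg hMne]
      have hexp : (24 + 8 - offset - ((23 - j : Nat) : Int)) = ((j : Int) + 9 - offset) := by
        have : ((23 - j : Nat) : Int) = 23 - (j : Int) := by omega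
        rw [this]; ring
      rw [hexp]
      congr 1
      congr 1
      -- mantissa fields agree
      have htn2 : ((24 : Int) - (j : Int)).toNat = 24 - j := by omega
      rw [htn2]
      simp only [Int.shiftLeft_eq, Int.shiftRight_eq_div_pow, one_mul]
      rw [show (1023:Int) = 2 ^ 10 - 1 by norm_num, pv_band_mask, pv_band_mask]
      have key := pv_mant_eq v j hj'
      have hhalf : v % 2 ^ 24 * 2 ^ (23 - j) / 2 ^ 13 = v % 2 ^ 24 * 2 ^ (24 - j) / 2 ^ 14 := by
        have h2413 : (2:Int) ^ 24 = 2 ^ 23 * 2 := by norm_num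
        have hA : v % 2 ^ 24 * 2 ^ (24 - j) = 2 * (v % 2 ^ 24 * 2 ^ (23 - j)) := by
          have : (2:Int) ^ (24 - j) = 2 * 2 ^ (23 - j) := by
            rw [← pow_succ']; congr 1; omega
          rw [this]; ring
        have hB : (2:Int) ^ 14 = 2 * 2 ^ 13 := by norm_num
        rw [hA, hB, Int.mul_ediv_mul_of_pos _ _ (by norm_num : (0:Int) < 2)]
      norm_num at key hhalf ⊢
      rw [hhalf]
      exact key.symm
    · have h01 : 0 ≤ v / 2 ^ j % 2 := Int.emod_nonneg _ (by norm_num)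
      rw [if_neg (by rw [hcond]; omega)]
      have hb0 : v / 2 ^ j % 2 = 0 := by omega
      have hm0 : (v % 2 ^ 24) / 2 ^ j % 2 = 0 := by rw [pv_bit_eq v j hj', hb0]
      have hlt2 : (v % 2 ^ 24) / 2 ^ j < 2 := by
        rw [Int.ediv_lt_iff_lt_mul (by positivity)]
        calc v % 2 ^ 24 < 2 ^ (j + 1) := hm
          _ = 2 * 2 ^ j := by rw [pow_succ]; ring
      have hdnn : 0 ≤ (v % 2 ^ 24) / 2 ^ j := Int.ediv_nonneg hmnn (by positivity)
      have hd0 : (v % 2 ^ 24) / 2 ^ j = 0 := by omega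
      have hlt : v % 2 ^ 24 < 2 ^ j := by
        by_contra hcon
        have : 1 ≤ (v % 2 ^ 24) / 2 ^ j := by
          rw [Int.le_ediv_iff_mul_le (by positivity)]
          omega
        omega
      exact ih (by omega) hlt

theorem pv_main (value offset : Int) : to_float16 value offset = to_float16_alt value offset := by
  simp only [to_float16, to_float16_alt]
  have hmod24 : ∀ w : Int, PySem.Int.mod w ((1:Int) <<< (24:Nat)) = w % 2 ^ 24 := by
    intro w
    rw [PySem.Int.mod_eq_emod_of_pos (by decide)]
    norm_num [Int.shiftLeft_eq]
  have hmodlt : ∀ w : Int, w % 2 ^ 24 < 2 ^ 24 := fun w => Int.emod_lt_of_pos w (by norm_num)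
  by_cases hneg : value > PySem.Int.floordiv (((1:Int) <<< (24:Nat)) - 1) 2
  · rw [decide_eq_true hneg, if_pos hneg, if_pos rfl, hmod24]
    have hl := pv_loop 24 (le_refl _)
      (PySem.Int.band (-value) (PySem.Int.floordiv (((1:Int) <<< (24:Nat)) - 1) 2)) offset true (hmodlt _)
    rw [show ((24:Nat):Int) - 1 = (24:Int) - 1 by norm_num] at hl
    exact hl
  · rw [decide_eq_false hneg, if_neg hneg, if_neg (fun h => Bool.false_ne_true h), hmod24]
    have hl := pv_loop 24 (le_refl _) value offset false (hmodlt _)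
    rw [show ((24:Nat):Int) - 1 = (24:Int) - 1 by norm_num] at hl
    exact hl

-- ===== VERDICT (by name: the statement is the Claim_ definition above) =====
theorem to_float16_spec : Claim_equal_to_float16 := by
  intro value offset _
  unfold Spec_to_float16
  exact pv_main value offset
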